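-- pv_equiv track=rewrite | github.com/apache/arrow-nanoarrow | dev/release/update-changelog.py | group_commits_by_top_level_component
-- ===== SOURCE A (Python) =====
-- def group_commits_by_top_level_component(parsed):
--     grouped = {}
--
--     for item in parsed:
--         component = item["component"]
--         top_level_component = component.split("/")[0] if component else ""
--         if top_level_component not in grouped:
--             grouped[top_level_component] = []
--
--         grouped[top_level_component].append(item)
--
--     return grouped
-- ===== SOURCE B (Python) =====
-- def group_commits_by_top_level_component(parsed):
--     def key(item):
--         component = item["component"]
--         return component.split("/")[0] if component else ""
--
--     order = list(dict.fromkeys(map(key, parsed)))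
--     return {c: [item for item in parsed if key(item) == c] for c in order}
-- ===== Notes on version B (the rewrite author's own statement) =====
-- stated objective: idiomatic
-- what changed: Replaces the incremental contains-check/insert/append dict-building loop with a declarative two-pass scheme: compute the first-seen order of top-level components with dict.fromkeys, then build each group by a per-component comprehension over parsed.
import Mathlib
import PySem

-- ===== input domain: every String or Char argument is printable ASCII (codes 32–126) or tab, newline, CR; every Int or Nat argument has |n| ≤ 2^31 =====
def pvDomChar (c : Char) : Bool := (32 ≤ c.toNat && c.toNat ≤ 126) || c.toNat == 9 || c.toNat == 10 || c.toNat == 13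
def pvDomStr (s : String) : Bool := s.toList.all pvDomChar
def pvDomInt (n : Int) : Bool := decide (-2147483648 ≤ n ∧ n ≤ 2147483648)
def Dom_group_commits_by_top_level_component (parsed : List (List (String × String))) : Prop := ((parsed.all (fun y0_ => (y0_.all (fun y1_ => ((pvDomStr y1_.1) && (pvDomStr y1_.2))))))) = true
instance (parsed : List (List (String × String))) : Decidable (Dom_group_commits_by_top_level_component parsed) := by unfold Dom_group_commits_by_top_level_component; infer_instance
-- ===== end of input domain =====

-- B replaces A's incremental contains/insert/append dict-building loop with a two-pass scheme:
-- first-seen order of top-level components (dict.fromkeys), then one filter pass per component (idiomatic, not faster).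


-- ===== PORT A =====
-- Shared key expression of both Pythons: component = item["component"]; component.split("/")[0] if component else "".
-- item["component"] is the lookup in the Python dict `item` (= PySem.Dict.ofList item); Pre_ guarantees the key is
-- present (Python raises KeyError otherwise), so the `.getD ""` default is never used on admitted inputs.
def pvKey (item : List (String × String)) : String :=
  let component := ((PySem.Dict.ofList item).get? "component").getD ""
  if component ≠ "" then PySem.List.pyGetD ((PySem.Str.split? component "/").getD []) 0 "" else ""

def group_commits_by_top_level_component (parsed : List (List (String × String))) : List (String × List (List (String × String))) :=
  (parsed.foldl
    (fun grouped item =>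
      let top_level_component := pvKey item
      let grouped₁ := if grouped.contains top_level_component then grouped
                      else grouped.insert top_level_component []
      grouped₁.modify top_level_component [] (fun l => l ++ [item]))
    PySem.Dict.empty).items

-- ===== PORT B =====
def group_commits_by_top_level_component_alt (parsed : List (List (String × String))) : List (String × List (List (String × String))) :=
  let order := PySem.List.dedup (parsed.map pvKey)
  order.map (fun c => (c, parsed.filter (fun item => pvKey item == c)))

-- ===== PRECONDITION & SPEC =====
-- Pre_ excludes exactly the items without a "component" key, on which Python A raises KeyError (B raises there too).
def Pre_group_commits_by_top_level_component (parsed : List (List (String × String))) : Prop :=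
  parsed.all (fun item => item.any (fun p => p.1 == "component")) = true
instance (parsed : List (List (String × String))) : Decidable (Pre_group_commits_by_top_level_component parsed) := by unfold Pre_group_commits_by_top_level_component; infer_instance

def pvWitness_group_commits_by_top_level_component : (List (List (String × String))) :=
  [[("component", "driver/postgres"), ("message", "fix")], [("component", "")], [("component", "driver")]]

def Spec_group_commits_by_top_level_component (parsed : List (List (String × String))) (out : List (String × List (List (String × String)))) : Prop := out = group_commits_by_top_level_component_alt parsed
instance (parsed : List (List (String × String))) (out : List (String × List (List (String × String)))) : Decidable (Spec_group_commits_by_top_level_component parsed out) := by unfold Spec_group_commits_by_top_level_component; infer_instance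

-- ===== CLAIM (what is proved, stated in full; the proofs are below) =====
def Claim_equal_group_commits_by_top_level_component : Prop := ∀ (parsed : List (List (String × String))), Dom_group_commits_by_top_level_component parsed → Pre_group_commits_by_top_level_component parsed → Spec_group_commits_by_top_level_component parsed (group_commits_by_top_level_component parsed)

-- ===== LEMMAS AND PROOFS =====

-- A's loop body, named for the proofs.
def pvStep (grouped : PySem.Dict String (List (List (String × String)))) (item : List (String × String)) :
    PySem.Dict String (List (List (String × String))) :=
  let top_level_component := pvKey item
  let grouped₁ := if grouped.contains top_level_component then grouped
                  else grouped.insert top_level_component []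
  grouped₁.modify top_level_component [] (fun l => l ++ [item])

lemma pvStep_getD (d : PySem.Dict String (List (List (String × String)))) (item : List (String × String)) (c : String) :
    (pvStep d item).getD c [] = d.getD c [] ++ (if pvKey item == c then [item] else []) := by
  unfold pvStep
  by_cases h : d.contains (pvKey item) = true
  · simp only [h, if_true, PySem.Dict.getD_modify]
    by_cases hc : c = pvKey item
    · simp [hc]
    · simp [hc]; exact Ne.symm hc
  · simp only [Bool.not_eq_true] at h
    simp only [h, Bool.false_eq_true, if_false, PySem.Dict.getD_modify, PySem.Dict.getD_insert]
    by_cases hc : c = pvKey item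
    · simp [hc, PySem.Dict.getD_of_not_contains d _ h]
    · simp [hc]; exact Ne.symm hc

lemma pvStep_keys (d : PySem.Dict String (List (List (String × String)))) (item : List (String × String)) :
    (pvStep d item).keys = PySem.Set.add d.keys (pvKey item) := by
  unfold pvStep
  by_cases h : d.contains (pvKey item) = true
  · simp only [h, if_true, PySem.Dict.keys_modify]
    rw [PySem.Dict.keys_insert_of_contains _ _ h,
      PySem.Set.add_of_mem ((PySem.Dict.contains_iff_mem_keys d _).mp h)]
  · simp only [Bool.not_eq_true] at h
    simp only [h, Bool.false_eq_true, if_false, PySem.Dict.keys_modify]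
    rw [PySem.Dict.keys_insert_of_contains, PySem.Dict.keys_insert_of_not_contains _ _ h,
      PySem.Set.add_of_not_mem (fun hm => by simp [(PySem.Dict.contains_iff_mem_keys d _).mpr hm] at h)]
    simp

lemma pvLoop_getD (parsed : List (List (String × String)))
    (d : PySem.Dict String (List (List (String × String)))) (c : String) :
    (parsed.foldl pvStep d).getD c [] = d.getD c [] ++ parsed.filter (fun item => pvKey item == c) := by
  induction parsed generalizing d with
  | nil => simp
  | cons y ys ih =>
    simp only [List.foldl_cons, List.filter_cons, ih, pvStep_getD]
    by_cases h : pvKey y == c <;> simp [h]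

lemma pvLoop_keys (parsed : List (List (String × String)))
    (d : PySem.Dict String (List (List (String × String)))) :
    (parsed.foldl pvStep d).keys = PySem.Set.update d.keys (parsed.map pvKey) := by
  induction parsed generalizing d with
  | nil => simp [PySem.Set.update_nil]
  | cons y ys ih => simp only [List.foldl_cons, List.map_cons, PySem.Set.update_cons, ih, pvStep_keys]

-- ===== VERDICT (by name: the statement is the Claim_ definition above) =====
theorem group_commits_by_top_level_component_spec : Claim_equal_group_commits_by_top_level_component := by
  intro parsed _ _
  unfold Spec_group_commits_by_top_level_component
  unfold group_commits_by_top_level_component group_commits_by_top_level_component_alt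
  have hfold : ∀ (d : PySem.Dict String (List (List (String × String)))) ,
      parsed.foldl
        (fun grouped item =>
          let top_level_component := pvKey item
          let grouped₁ := if grouped.contains top_level_component then grouped
                          else grouped.insert top_level_component []
          grouped₁.modify top_level_component [] (fun l => l ++ [item])) d
      = parsed.foldl pvStep d := by
    intro d; rfl
  rw [hfold]
  have hk : (parsed.foldl pvStep PySem.Dict.empty).keys = PySem.Set.ofList (parsed.map pvKey) := by
    rw [pvLoop_keys, PySem.Dict.keys_empty, PySem.Set.update_nil_left]
  have hnd : (parsed.foldl pvStep PySem.Dict.empty).keys.Nodup := by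
    rw [hk]; exact PySem.Set.nodup_ofList _
  rw [PySem.Dict.items_eq_map_keys _ hnd [], hk, PySem.List.dedup_eq_ofList]
  exact List.map_congr_left (fun c _ => by
    rw [pvLoop_getD, PySem.Dict.getD_empty]
    simp)
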